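-- pv_equiv track=rewrite | github.com/Rebellians/ArnavProjects | calendars.py | fromMiddle
-- ===== SOURCE A (Python) =====
-- def fromMiddle(age, year):
--     ageLengths = [None, 590, 3441, 3021, 2000, 2000, 2000]
--     if age < 1 or age > 7:
--         raise ValueError("Invalid Middle Earth age")
--     modern_year = 1971
--     for i in range(7, age, -1):
--         modern_year -= ageLengths[i - 1]
--     modern_year += year
--     return modern_year
-- ===== SOURCE B (Python) =====
-- def fromMiddle(age, year):
--     if age < 1 or age > 7:
--         raise ValueError("Invalid Middle Earth age")
--     # closed form: the three latest ages all last 2000 years, the earlier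
--     # ages contribute their individual lengths once age drops below them
--     offset = 2000 * min(3, 7 - age)
--     if age <= 3:
--         offset += 3021
--     if age <= 2:
--         offset += 3441
--     if age <= 1:
--         offset += 590
--     return 1971 - offset + year
-- ===== Notes on version B (the rewrite author's own statement) =====
-- stated objective: alternative
-- what changed: B replaces A's downward subtraction loop over the ageLengths list by a loop-free closed-form: 2000*min(3, 7-age) for the three equal-length latest ages plus threshold conditionals adding 3021/3441/590 for the earlier ages, with no list at all.
import Mathlib
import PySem

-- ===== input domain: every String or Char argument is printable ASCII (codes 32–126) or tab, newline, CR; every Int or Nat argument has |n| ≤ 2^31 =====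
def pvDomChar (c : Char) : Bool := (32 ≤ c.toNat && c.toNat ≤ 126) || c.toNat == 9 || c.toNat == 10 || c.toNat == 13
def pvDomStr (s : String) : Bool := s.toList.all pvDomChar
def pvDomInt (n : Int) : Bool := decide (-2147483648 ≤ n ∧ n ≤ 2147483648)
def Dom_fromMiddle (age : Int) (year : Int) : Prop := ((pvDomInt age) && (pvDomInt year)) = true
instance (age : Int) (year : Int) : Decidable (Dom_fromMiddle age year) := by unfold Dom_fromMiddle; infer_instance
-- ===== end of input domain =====

-- B replaces A's downward subtraction loop over the ageLengths list by loop-free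
-- closed-form arithmetic (objective: alternative decomposition, same cost).

-- ===== PORT A =====
-- ageLengths is a Python list containing None at index 0: modelled as List (Option Int).
-- Under Pre_ (1 ≤ age ≤ 7) every accessed entry is `some _`; the `.getD 0` default is never reached.
def fromMiddle (age : Int) (year : Int) : Int :=
  let ageLengths : List (Option Int) :=
    [none, some 590, some 3441, some 3021, some 2000, some 2000, some 2000]
  let modern_year : Int :=
    (PySem.List.pyRange 7 age (-1)).foldl
      (fun m i => m - (((PySem.List.pyGet? ageLengths (i - 1)).join).getD 0)) 1971
  modern_year + year

-- ===== PORT B =====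
def fromMiddle_alt (age : Int) (year : Int) : Int :=
  let offset0 : Int := 2000 * min 3 (7 - age)
  let offset1 : Int := if age ≤ 3 then offset0 + 3021 else offset0
  let offset2 : Int := if age ≤ 2 then offset1 + 3441 else offset1
  let offset3 : Int := if age ≤ 1 then offset2 + 590 else offset2
  1971 - offset3 + year

-- ===== PRECONDITION & SPEC =====
-- A raises ValueError exactly when age < 1 or age > 7; Pre_ admits the other inputs.
def Pre_fromMiddle (age : Int) (year : Int) : Prop := 1 ≤ age ∧ age ≤ 7
instance (age : Int) (year : Int) : Decidable (Pre_fromMiddle age year) := by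
  unfold Pre_fromMiddle; infer_instance
def pvWitness_fromMiddle : Int × Int := (3, 100)
def Spec_fromMiddle (age : Int) (year : Int) (out : Int) : Prop := out = fromMiddle_alt age year
instance (age : Int) (year : Int) (out : Int) : Decidable (Spec_fromMiddle age year out) := by
  unfold Spec_fromMiddle; infer_instance

-- ===== CLAIM =====
def Claim_equal_fromMiddle : Prop := ∀ (age : Int) (year : Int), Dom_fromMiddle age year → Pre_fromMiddle age year → Spec_fromMiddle age year (fromMiddle age year)

-- ===== LEMMAS AND PROOFS =====
theorem fromMiddle_shift (age year : Int) :
    fromMiddle age year = fromMiddle age 0 + year := by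
  simp [fromMiddle]

theorem fromMiddle_alt_shift (age year : Int) :
    fromMiddle_alt age year = fromMiddle_alt age 0 + year := by
  simp [fromMiddle_alt]

theorem fromMiddle_case (age : Int) (h1 : 1 ≤ age) (h2 : age ≤ 7) (year : Int) :
    fromMiddle age year = fromMiddle_alt age year := by
  rw [fromMiddle_shift, fromMiddle_alt_shift]
  have : fromMiddle age 0 = fromMiddle_alt age 0 := by
    interval_cases age <;> decide
  rw [this]

-- ===== VERDICT =====
theorem fromMiddle_spec : Claim_equal_fromMiddle := by
  intro age year _ hpre
  exact fromMiddle_case age hpre.1 hpre.2 year
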